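-- pv_equiv track=rewrite | github.com/csirmaz/polymatroidal_cone | v2/convexhull_gen.py | fill2matrix
-- ===== SOURCE A (Python) =====
-- def fill2matrix(fill):
--     """Given a column fill vector, produce a 0-1 matrix"""
--     maxlength = len(fill)
--     matrix = []
--     for j in range(maxlength):
--         matrix.append([0 for i in range(maxlength)])
--
--     for i, f in enumerate(fill):
--         for j in range(f):
--             matrix[j][i] = 1
--     return matrix
-- ===== SOURCE B (Python) =====
-- def fill2matrix(fill):
--     """Given a column fill vector, produce a 0-1 matrix"""
--     n = len(fill)
--     columns = []
--     for f in fill: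
--         col = [0] * n
--         for j in range(f):
--             col[j] = 1
--         columns.append(col)
--     return [list(row) for row in zip(*columns)]
-- ===== Notes on version B (the rewrite author's own statement) =====
-- stated objective: alternative
-- what changed: B builds each 0-1 column independently from its fill count and transposes the column list with zip, instead of preallocating the full n-by-n zero matrix and scatter-writing 1s into the shared rows.
import Mathlib
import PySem

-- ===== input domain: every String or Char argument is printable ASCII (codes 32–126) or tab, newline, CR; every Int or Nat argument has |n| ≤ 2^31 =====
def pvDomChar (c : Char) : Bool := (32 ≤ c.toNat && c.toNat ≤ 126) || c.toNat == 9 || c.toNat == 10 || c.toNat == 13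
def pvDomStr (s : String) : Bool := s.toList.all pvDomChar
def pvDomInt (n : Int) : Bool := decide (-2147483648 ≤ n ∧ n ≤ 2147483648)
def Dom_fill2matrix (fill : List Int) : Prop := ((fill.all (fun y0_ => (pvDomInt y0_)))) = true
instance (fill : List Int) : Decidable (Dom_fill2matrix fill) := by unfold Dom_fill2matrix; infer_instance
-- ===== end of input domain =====

-- B builds each 0-1 column independently from its fill count and transposes with zip,
-- instead of preallocating the n×n matrix and scatter-writing rows (objective: alternative).

-- ===== PORT A =====
def fill2matrix (fill : List Int) : List (List Int) :=
  let maxlength := fill.length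
  let matrix := (List.range maxlength).foldl
    (fun m _ => m ++ [(List.range maxlength).map (fun _ => (0 : Int))]) []
  (PySem.List.enumerate fill).foldl
    (fun m p =>
      (PySem.List.pyRange 0 p.2 1).foldl
        (fun m j => m.modify j.toNat (fun row => row.set p.1.toNat 1)) m)
    matrix

-- ===== PORT B =====
-- zip(*columns) with each row materialised by list(...): Python's zip truncates to the
-- shortest input; exact here since getD is only read at indices below every length
def pvZipStar (cols : List (List Int)) : List (List Int) :=
  match cols with
  | [] => []
  | c :: rest =>
    let m := rest.foldl (fun m col => Nat.min m col.length) c.length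
    (List.range m).map (fun j => (c :: rest).map (fun col => col.getD j 0))

def fill2matrix_alt (fill : List Int) : List (List Int) :=
  let n := fill.length
  let columns := fill.foldl
    (fun cols f =>
      cols ++ [(PySem.List.pyRange 0 f 1).foldl
        (fun col j => col.set j.toNat 1) (List.replicate n (0 : Int))])
    []
  pvZipStar columns

-- ===== PRECONDITION & SPEC =====
-- Pre_ excludes exactly the inputs on which both Pythons raise IndexError: some fill[i]
-- larger than len(fill), so the column write runs past the column height.
def Pre_fill2matrix (fill : List Int) : Prop := ∀ f ∈ fill, f ≤ (fill.length : Int)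
instance (fill : List Int) : Decidable (Pre_fill2matrix fill) := by
  unfold Pre_fill2matrix; infer_instance
def pvWitness_fill2matrix : List Int := [2, 0, 1]

def Spec_fill2matrix (fill : List Int) (out : List (List Int)) : Prop := out = fill2matrix_alt fill
instance (fill : List Int) (out : List (List Int)) : Decidable (Spec_fill2matrix fill out) := by unfold Spec_fill2matrix; infer_instance

-- ===== CLAIM (what is proved, stated in full; the proofs are below) =====
def Claim_equal_fill2matrix : Prop := ∀ (fill : List Int), Dom_fill2matrix fill → Pre_fill2matrix fill → Spec_fill2matrix fill (fill2matrix fill)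

-- ===== LEMMAS AND PROOFS =====

-- the zero-matrix building loop appends rows
theorem foldl_append_rows {α : Type} (l : List Nat) (z : α) (acc : List α) :
    l.foldl (fun m _ => m ++ [z]) acc = acc ++ List.replicate l.length z := by
  induction l generalizing acc with
  | nil => simp
  | cons x xs ih =>
    rw [List.foldl_cons, ih]
    simp [List.replicate_succ]

theorem modify_map_range {α : Type} (n k : Nat) (t : α → α) (h : Nat → α) :
    ((List.range n).map h).modify k t
      = (List.range n).map (fun j => if j = k then t (h j) else h j) := by
  apply List.ext_getElem
  · simp
  · intro i h1 h2
    simp only [List.length_modify, List.length_map, List.length_range] at h1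
    rw [List.getElem_modify]
    simp only [List.getElem_map, List.getElem_range]
    by_cases hik : i = k
    · simp [hik]
    · simp [hik, Ne.symm hik]

-- inner loop: for j in range(f): matrix[j][i] = 1, on a matrix of shape (range n).map g
theorem inner_loop_nat (n : Nat) (g : Nat → List Int) (i : Nat) (k : Nat) :
    (PySem.List.pyRange 0 (k : Int) 1).foldl
        (fun m j => m.modify j.toNat (fun row => row.set i 1)) ((List.range n).map g)
      = (List.range n).map (fun (j : Nat) => if j < k then (g j).set i 1 else g j) := by
  induction k with
  | zero => simp [PySem.List.pyRange_one_eq_nil]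
  | succ k ih =>
    have hsplit : PySem.List.pyRange 0 ((k + 1 : Nat) : Int) 1
        = PySem.List.pyRange 0 (k : Int) 1 ++ [(k : Int)] := by
      push_cast
      exact PySem.List.pyRange_one_succ_right (by omega)
    rw [hsplit, List.foldl_append, ih, List.foldl_cons, List.foldl_nil]
    have hkk : ((k : Int)).toNat = k := by omega
    rw [hkk]
    by_cases hkn : k < n
    · rw [modify_map_range n k _ _]
      apply List.map_congr_left
      intro j hj
      rcases eq_or_ne j k with rfl | hne
      · simp
      · simp only [hne, if_false]
        by_cases h3 : j < k
        · have h4 : j < k + 1 := by omega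
          simp [h3, h4]
        · have h4 : ¬ j < k + 1 := by omega
          simp [h3, h4]
    · rw [List.modify_eq_self (by simp; omega)]
      apply List.map_congr_left
      intro j hj
      have hj' : j < n := List.mem_range.mp hj
      have h3 : j < k := by omega
      have h4 : j < k + 1 := by omega
      simp [h3, h4]

theorem inner_loop (n : Nat) (g : Nat → List Int) (i : Nat) (f : Int) :
    (PySem.List.pyRange 0 f 1).foldl
        (fun m j => m.modify j.toNat (fun row => row.set i 1)) ((List.range n).map g)
      = (List.range n).map (fun (j : Nat) => if (j : Int) < f then (g j).set i 1 else g j) := by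
  by_cases hf0 : f ≤ 0
  · rw [PySem.List.pyRange_one_eq_nil hf0, List.foldl_nil]
    apply List.map_congr_left
    intro j hj
    have : ¬ ((j : Int) < f) := by omega
    simp [this]
  · obtain ⟨k, rfl⟩ : ∃ k : Nat, f = (k : Int) := ⟨f.toNat, by omega⟩
    rw [inner_loop_nat n g i k]
    apply List.map_congr_left
    intro j hj
    by_cases h3 : j < k
    · have h4 : (j : Int) < (k : Int) := by omega
      simp [h3, h4]
    · have h4 : ¬ (j : Int) < (k : Int) := by omega
      simp [h3, h4]

-- outer loop over any pair list, pushed into each row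
theorem outer_loop (n : Nat) (ps : List (Int × Int)) (g : Nat → List Int) :
    ps.foldl
        (fun m p =>
          (PySem.List.pyRange 0 p.2 1).foldl
            (fun m j => m.modify j.toNat (fun row => row.set p.1.toNat 1)) m)
        ((List.range n).map g)
      = (List.range n).map
          (fun (j : Nat) => ps.foldl (fun row p => if (j : Int) < p.2 then row.set p.1.toNat 1 else row) (g j)) := by
  induction ps generalizing g with
  | nil => simp
  | cons p ps ih =>
    rw [List.foldl_cons, inner_loop n g p.1.toNat p.2, ih]
    apply List.map_congr_left
    intro j hj
    rw [List.foldl_cons]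

-- one row: the column-by-column updates of a zero row produce B's comprehension row
theorem row_loop (j : Int) (xs : List Int) (pre row : List Int) (hrow : row.length = xs.length) :
    (PySem.List.enumerate xs (pre.length : Int)).foldl
        (fun r p => if j < p.2 then r.set p.1.toNat 1 else r) (pre ++ row)
      = pre ++ (xs.zip row).map (fun q => if j < q.1 then 1 else q.2) := by
  induction xs generalizing pre row with
  | nil =>
    have : row = [] := by simpa using List.length_eq_zero_iff.mp (by simp [hrow])
    simp [this, PySem.List.enumerate]
  | cons x xs ih =>
    cases row with
    | nil => simp at hrow
    | cons r0 row' =>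
      rw [PySem.List.enumerate_cons, List.foldl_cons]
      have hset : ∀ v : Int, (pre ++ r0 :: row').set ((pre.length : Int)).toNat v
          = (pre ++ [v]) ++ row' := by
        intro v
        have : ((pre.length : Int)).toNat = pre.length := by omega
        rw [this, List.set_append_right _ _ (le_refl _)]
        simp
      by_cases h : j < x
      · simp only [h, if_true, hset 1]
        have hlen : ((pre ++ [(1 : Int)]).length : Int) = (pre.length : Int) + 1 := by
          simp
        rw [← hlen, ih (pre ++ [1]) row' (by simpa using hrow)]
        simp [h]
      · have hpr : pre ++ r0 :: row' = (pre ++ [r0]) ++ row' := by simp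
        simp only [h, if_false, hpr]
        have hlen : ((pre ++ [r0]).length : Int) = (pre.length : Int) + 1 := by
          simp
        rw [← hlen, ih (pre ++ [r0]) row' (by simpa using hrow)]
        simp [h]

theorem zip_zero_row (j : Int) (xs : List Int) :
    ((xs.zip (List.replicate xs.length (0 : Int))).map
        (fun q => if j < q.1 then 1 else q.2))
      = xs.map (fun f => if j < f then 1 else 0) := by
  induction xs with
  | nil => simp
  | cons x xs ih => simp [List.replicate_succ, ih]

-- B side: a single set on a range-map matrixed row
theorem set_map_range {α : Type} (n k : Nat) (v : α) (h : Nat → α) :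
    ((List.range n).map h).set k v = (List.range n).map (fun j => if j = k then v else h j) := by
  apply List.ext_getElem
  · simp
  · intro i h1 h2
    simp only [List.length_set, List.length_map, List.length_range] at h1
    rw [List.getElem_set]
    simp only [List.getElem_map, List.getElem_range]
    by_cases hik : i = k
    · simp [hik]
    · simp [hik, Ne.symm hik]

-- B's column loop: for j in range(f): col[j] = 1
theorem col_loop_nat (n : Nat) (h : Nat → Int) (k : Nat) :
    (PySem.List.pyRange 0 (k : Int) 1).foldl
        (fun col j => col.set j.toNat 1) ((List.range n).map h)
      = (List.range n).map (fun j => if j < k then 1 else h j) := by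
  induction k with
  | zero => simp [PySem.List.pyRange_one_eq_nil]
  | succ k ih =>
    have hsplit : PySem.List.pyRange 0 ((k + 1 : Nat) : Int) 1
        = PySem.List.pyRange 0 (k : Int) 1 ++ [(k : Int)] := by
      push_cast
      exact PySem.List.pyRange_one_succ_right (by omega)
    rw [hsplit, List.foldl_append, ih, List.foldl_cons, List.foldl_nil]
    have hkk : ((k : Int)).toNat = k := by omega
    rw [hkk, set_map_range]
    apply List.map_congr_left
    intro j hj
    rcases eq_or_ne j k with rfl | hne
    · simp
    · simp only [hne, if_false]
      by_cases h3 : j < k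
      · have h4 : j < k + 1 := by omega
        simp [h3, h4]
      · have h4 : ¬ j < k + 1 := by omega
        simp [h3, h4]

theorem col_loop (n : Nat) (h : Nat → Int) (f : Int) :
    (PySem.List.pyRange 0 f 1).foldl
        (fun col j => col.set j.toNat 1) ((List.range n).map h)
      = (List.range n).map (fun (j : Nat) => if (j : Int) < f then 1 else h j) := by
  by_cases hf0 : f ≤ 0
  · rw [PySem.List.pyRange_one_eq_nil hf0, List.foldl_nil]
    apply List.map_congr_left
    intro j hj
    have : ¬ ((j : Int) < f) := by omega
    simp [this]
  · obtain ⟨k, rfl⟩ : ∃ k : Nat, f = (k : Int) := ⟨f.toNat, by omega⟩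
    rw [col_loop_nat n h k]
    apply List.map_congr_left
    intro j hj
    by_cases h3 : j < k
    · have h4 : (j : Int) < (k : Int) := by omega
      simp [h3, h4]
    · have h4 : ¬ (j : Int) < (k : Int) := by omega
      simp [h3, h4]

-- B's column-accumulating loop is a map
theorem foldl_append_map {α β : Type} (xs : List α) (g : α → β) (acc : List β) :
    xs.foldl (fun cols x => cols ++ [g x]) acc = acc ++ xs.map g := by
  induction xs generalizing acc with
  | nil => simp
  | cons x xs ih => simp [List.foldl_cons, ih]

theorem foldl_min_const (n : Nat) (cols : List (List Int)) (hc : ∀ c ∈ cols, c.length = n) :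
    cols.foldl (fun m col => Nat.min m col.length) n = n := by
  induction cols with
  | nil => rfl
  | cons c cols ih =>
    rw [List.foldl_cons, hc c (by simp)]
    simp only [Nat.min_self]
    exact ih (fun d hd => hc d (by simp [hd]))

theorem pvZipStar_cons (c : List Int) (rest : List (List Int)) :
    pvZipStar (c :: rest)
      = (List.range (rest.foldl (fun m col => Nat.min m col.length) c.length)).map
          (fun j => (c :: rest).map (fun col => col.getD j 0)) := rfl

-- B's port computes the canonical predicate matrix
theorem alt_eq_canon (fill : List Int) :
    fill2matrix_alt fill
      = (List.range fill.length).map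
          (fun (j : Nat) => fill.map (fun f => if (j : Int) < f then 1 else 0)) := by
  have hB : fill2matrix_alt fill
      = pvZipStar (fill.foldl
          (fun cols f =>
            cols ++ [(PySem.List.pyRange 0 f 1).foldl
              (fun col j => col.set j.toNat 1) (List.replicate fill.length (0 : Int))])
          []) := rfl
  have hrep : List.replicate fill.length (0 : Int)
      = (List.range fill.length).map (fun _ => (0 : Int)) := by
    simp [List.map_const', List.length_range]
  have hcols : fill.foldl
      (fun cols f =>
        cols ++ [(PySem.List.pyRange 0 f 1).foldl
          (fun col j => col.set j.toNat 1) (List.replicate fill.length (0 : Int))])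
      []
      = fill.map (fun f => (List.range fill.length).map
          (fun (j : Nat) => if (j : Int) < f then 1 else 0)) := by
    rw [foldl_append_map, List.nil_append]
    apply List.map_congr_left
    intro f hf
    rw [hrep, col_loop]
  rw [hB, hcols]
  cases fill with
  | nil => simp [pvZipStar]
  | cons f0 rest =>
    rw [List.map_cons, pvZipStar_cons]
    simp only [List.length_map, List.length_range]
    rw [foldl_min_const (f0 :: rest).length _
      (by intro c hc
          obtain ⟨f, _, rfl⟩ := List.mem_map.mp hc
          simp)]
    apply List.map_congr_left
    intro j hj
    have hj' : j < (f0 :: rest).length := List.mem_range.mp hj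
    have hcell : ∀ f : Int,
        List.getD ((List.range (f0 :: rest).length).map
          (fun (i : Nat) => if (i : Int) < f then (1 : Int) else 0)) j 0
          = if (j : Int) < f then 1 else 0 := by
      intro f
      rw [List.getD_eq_getElem?_getD, List.getElem?_map, List.getElem?_range hj']
      simp
    simp only [List.map_cons, List.map_map]
    congr 1
    · exact hcell f0
    · apply List.map_congr_left
      intro f hf2
      simp only [Function.comp_apply]
      exact hcell f

-- ===== VERDICT (by name: the statement is the Claim_ definition above) =====
theorem fill2matrix_spec : Claim_equal_fill2matrix := by
  intro fill _ _
  unfold Spec_fill2matrix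
  rw [alt_eq_canon]
  set n := fill.length with hn
  have hA : fill2matrix fill
      = (PySem.List.enumerate fill).foldl
          (fun m p =>
            (PySem.List.pyRange 0 p.2 1).foldl
              (fun m j => m.modify j.toNat (fun row => row.set p.1.toNat 1)) m)
          ((List.range n).foldl (fun m _ => m ++ [(List.range n).map (fun _ => (0 : Int))]) []) := rfl
  rw [hA, foldl_append_rows, List.nil_append, List.length_range]
  show _ = (List.range n).map (fun (j : Nat) => fill.map (fun f => if (j : Int) < f then 1 else 0))
  have hrep : List.replicate n ((List.range n).map (fun _ => (0 : Int)))
      = (List.range n).map (fun _ => (List.range n).map (fun _ => (0 : Int))) := by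
    simp [List.map_const', List.length_range]
  rw [hrep, outer_loop]
  apply List.map_congr_left
  intro j hj
  have hz : (List.range n).map (fun _ => (0 : Int)) = List.replicate fill.length 0 := by
    rw [List.map_const', List.length_range]
  rw [hz]
  have := row_loop (j : Int) fill [] (List.replicate fill.length 0) (by simp)
  simpa [zip_zero_row] using this
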